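-- pv_equiv track=rewrite | github.com/rampyprogrammer/html_and_css | p.py | isexact
-- ===== SOURCE A (Python) =====
-- def isexact(str1,str2):
--     strsiz1=len(str1)
--     strsiz2=len(str2)
--     if strsiz1==0:
--         return False
--     if strsiz2==0:
--         return True
--     if str1[0]==str2[0]:
--         return isexact(str1[1:],str2[1:])
-- ===== SOURCE B (Python) =====
-- def isexact(str1, str2):
--     n1, n2 = len(str1), len(str2)
--     i = 0
--     while i < n1 and i < n2 and str1[i] == str2[i]:
--         i += 1
--     if i == n1:
--         return False
--     if i == n2:
--         return True
--     return None
-- ===== Notes on version B (the rewrite author's own statement) =====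
-- stated objective: faster
-- what changed: Replaced the recursion that slices both strings on every step with a single index loop comparing characters in place, then classifying the stop position.
import Mathlib
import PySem

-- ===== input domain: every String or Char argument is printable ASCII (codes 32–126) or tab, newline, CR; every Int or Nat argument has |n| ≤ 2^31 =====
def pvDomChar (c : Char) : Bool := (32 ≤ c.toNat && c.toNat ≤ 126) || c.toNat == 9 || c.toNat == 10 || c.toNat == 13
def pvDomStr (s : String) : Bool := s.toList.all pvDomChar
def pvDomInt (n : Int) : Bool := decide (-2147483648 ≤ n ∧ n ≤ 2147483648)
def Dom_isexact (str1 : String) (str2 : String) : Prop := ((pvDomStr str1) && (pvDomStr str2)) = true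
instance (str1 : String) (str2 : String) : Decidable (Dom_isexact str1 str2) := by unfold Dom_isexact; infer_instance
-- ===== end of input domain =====

-- B replaces A's slice-per-step recursion by one index loop over the characters (no copies); same return value, O(n) instead of O(n^2).

-- ===== PORT A =====
-- A's recursion on the two strings; str[1:] is the tail of the character list.
def isexactGoA : List Char → List Char → Option Bool
  | [], _ => some false
  | _ :: _, [] => some true
  | a :: s1, b :: s2 => if a = b then isexactGoA s1 s2 else none

def isexact (str1 : String) (str2 : String) : Option Bool :=
  isexactGoA str1.toList str2.toList

-- ===== PORT B =====
-- B's while loop: advance i while both strings have an i-th char and they agree,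
-- then classify the stop position (i == n1 → False, i == n2 → True, mismatch → None).
def isexactGoB (s1 s2 : List Char) (i : Nat) : Option Bool :=
  if h1 : i < s1.length then
    if h2 : i < s2.length then
      if s1[i] = s2[i] then isexactGoB s1 s2 (i + 1)
      else none
    else some true
  else some false
termination_by s1.length - i

def isexact_alt (str1 : String) (str2 : String) : Option Bool :=
  isexactGoB str1.toList str2.toList 0

-- ===== PRECONDITION & SPEC =====
def Spec_isexact (str1 : String) (str2 : String) (out : Option Bool) : Prop := out = isexact_alt str1 str2
instance (str1 : String) (str2 : String) (out : Option Bool) : Decidable (Spec_isexact str1 str2 out) := by unfold Spec_isexact; infer_instance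

-- ===== CLAIM (what is proved, stated in full; the proofs are below) =====
def Claim_equal_isexact : Prop := ∀ (str1 : String) (str2 : String), Dom_isexact str1 str2 → Spec_isexact str1 str2 (isexact str1 str2)

-- ===== LEMMAS AND PROOFS =====

-- B's loop from position i computes A's recursion on the suffixes from i.
theorem isexactGoB_eq_goA (s1 s2 : List Char) (i : Nat) :
    isexactGoB s1 s2 i = isexactGoA (s1.drop i) (s2.drop i) := by
  generalize hk : s1.length - i = k
  induction k generalizing i with
  | zero =>
      rw [isexactGoB, dif_neg (by omega), List.drop_eq_nil_iff.mpr (by omega)]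
      cases s2.drop i <;> rfl
  | succ k ih =>
      have h1 : i < s1.length := by omega
      rw [isexactGoB, dif_pos h1]
      by_cases h2 : i < s2.length
      · rw [dif_pos h2, List.drop_eq_getElem_cons h1, List.drop_eq_getElem_cons h2, isexactGoA]
        by_cases heq : s1[i] = s2[i]
        · rw [if_pos heq, if_pos heq, ih (i + 1) (by omega)]
        · rw [if_neg heq, if_neg heq]
      · rw [dif_neg h2, List.drop_eq_getElem_cons h1,
              show s2.drop i = [] from List.drop_eq_nil_iff.mpr (by omega)]
        rfl

-- ===== VERDICT (by name: the statement is the Claim_ definition above) =====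
theorem isexact_spec : Claim_equal_isexact := by
  intro str1 str2 _
  unfold Spec_isexact isexact isexact_alt
  rw [isexactGoB_eq_goA, List.drop_zero, List.drop_zero]
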